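-- pv_equiv track=rewrite | github.com/sandro20450/bichos-app | app.py | calcular_ranking_atraso_completo
-- ===== SOURCE A (Python) =====
-- def calcular_ranking_atraso_completo(historico):
--     if not historico: return []
--     atrasos = {}
--     total = len(historico)
--     for b in range(1, 26):
--         indices = [i for i, x in enumerate(historico) if x == b]
--         val = total - 1 - indices[-1] if indices else total
--         atrasos[b] = val
--     rank = sorted(atrasos.items(), key=lambda x: -x[1])
--     return [g for g, s in rank]
-- ===== SOURCE B (Python) =====
-- def calcular_ranking_atraso_completo(historico):
--     if not historico:
--         return []
--     last = {}
--     for i, x in enumerate(historico):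
--         if 1 <= x <= 25:
--             last[x] = i
--     return sorted(range(1, 26), key=lambda b: last.get(b, -1))
-- ===== Notes on version B (the rewrite author's own statement) =====
-- stated objective: faster
-- what changed: Replaces A's 25 full scans of historico (one list comprehension per number) with a single enumerate pass building a last-occurrence dict, then sorts 1..25 by that last index with default -1 instead of sorting dict items by negated delay.
import Mathlib
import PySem

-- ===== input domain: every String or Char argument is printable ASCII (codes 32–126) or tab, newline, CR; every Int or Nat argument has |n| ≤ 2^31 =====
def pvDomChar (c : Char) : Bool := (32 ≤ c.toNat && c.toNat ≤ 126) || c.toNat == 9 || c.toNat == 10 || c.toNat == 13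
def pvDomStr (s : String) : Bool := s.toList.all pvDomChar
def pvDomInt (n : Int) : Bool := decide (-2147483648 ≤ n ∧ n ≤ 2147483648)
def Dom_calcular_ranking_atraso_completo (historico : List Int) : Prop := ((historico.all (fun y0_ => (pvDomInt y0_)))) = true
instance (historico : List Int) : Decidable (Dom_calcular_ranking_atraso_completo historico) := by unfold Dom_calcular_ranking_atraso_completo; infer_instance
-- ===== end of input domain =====

-- B replaces A's 25 scans of historico with one pass building a last-occurrence dict,
-- then sorts the numbers 1..25 by that last index (default -1) — same result, fewer passes.


-- ===== PORT A =====
def calcular_ranking_atraso_completo (historico : List Int) : List Int :=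
  if historico = [] then []
  else
    let total : Int := historico.length
    let atrasos : PySem.Dict Int Int :=
      (PySem.List.pyRange 1 26 1).foldl (fun d b =>
        let indices : List Int :=
          ((PySem.List.enumerate historico 0).filter (fun p => p.2 == b)).map (·.1)
        let val : Int :=
          if indices ≠ [] then total - 1 - ((PySem.List.pyGet? indices (-1)).getD 0) else total
        d.insert b val) PySem.Dict.empty
    let rank := PySem.List.sorted atrasos.items (fun x => -x.2) false
    rank.map (·.1)

-- ===== PORT B =====
def calcular_ranking_atraso_completo_alt (historico : List Int) : List Int :=
  if historico = [] then []
  else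
    let last : PySem.Dict Int Int :=
      (PySem.List.enumerate historico 0).foldl (fun d p =>
        if 1 ≤ p.2 ∧ p.2 ≤ 25 then d.insert p.2 p.1 else d) PySem.Dict.empty
    PySem.List.sorted (PySem.List.pyRange 1 26 1) (fun b => last.getD b (-1)) false

-- ===== PRECONDITION & SPEC =====
def Spec_calcular_ranking_atraso_completo (historico : List Int) (out : List Int) : Prop := out = calcular_ranking_atraso_completo_alt historico
instance (historico : List Int) (out : List Int) : Decidable (Spec_calcular_ranking_atraso_completo historico out) := by unfold Spec_calcular_ranking_atraso_completo; infer_instance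

-- ===== CLAIM (what is proved, stated in full; the proofs are below) =====
def Claim_equal_calcular_ranking_atraso_completo : Prop := ∀ (historico : List Int), Dom_calcular_ranking_atraso_completo historico → Spec_calcular_ranking_atraso_completo historico (calcular_ranking_atraso_completo historico)

-- ===== LEMMAS AND PROOFS =====

-- last index (as Int) at which b occurs in h, phrased exactly as A's comprehension computes it
def pvF (h : List Int) (b : Int) : Option Int :=
  (((PySem.List.enumerate h 0).filter (fun p => p.2 == b)).map (·.1)).getLast?

-- the value A stores for b
def pvValA (h : List Int) (b : Int) : Int :=
  match pvF h b with
  | some i => (h.length : Int) - 1 - i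
  | none => (h.length : Int)

lemma insertBy_map {α β : Type} (r : β → β → Bool) (f : α → β) (x : α) (ys : List α) :
    PySem.List.insertBy r (f x) (ys.map f)
      = (PySem.List.insertBy (fun a b => r (f a) (f b)) x ys).map f := by
  induction ys with
  | nil => rfl
  | cons y ys ih =>
    simp only [List.map_cons, PySem.List.insertBy]
    by_cases hr : r (f x) (f y) = true <;> simp [hr, ih]

lemma foldl_insertBy_map {α β : Type} (r : β → β → Bool) (f : α → β) :
    ∀ (xs acc : List α),
      (xs.map f).foldl (fun a x => PySem.List.insertBy r x a) (acc.map f)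
        = (xs.foldl (fun a x => PySem.List.insertBy (fun a b => r (f a) (f b)) x a) acc).map f := by
  intro xs
  induction xs with
  | nil => intro acc; rfl
  | cons x xs ih =>
    intro acc
    simp only [List.map_cons, List.foldl_cons]
    rw [insertBy_map, ih]

lemma sorted_map {α β : Type} (f : α → β) (key : β → Int) (xs : List α) :
    PySem.List.sorted (xs.map f) key false
      = (PySem.List.sorted xs (fun a => key (f a)) false).map f := by
  rw [PySem.List.sorted_eq_foldl_insertBy, PySem.List.sorted_eq_foldl_insertBy]
  have := foldl_insertBy_map (fun a b => decide (key a < key b)) f xs []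
  simpa using this

lemma insertBy_congr {α : Type} (r r' : α → α → Bool) (x : α) (ys : List α)
    (h : ∀ y ∈ ys, r x y = r' x y) :
    PySem.List.insertBy r x ys = PySem.List.insertBy r' x ys := by
  induction ys with
  | nil => rfl
  | cons y ys ih =>
    simp only [PySem.List.insertBy]
    rw [h y (by simp)]
    by_cases hr : r' x y = true <;>
      simp [hr, ih (fun z hz => h z (by simp [hz]))]

lemma foldl_insertBy_congr {α : Type} (S : List α) (r r' : α → α → Bool)
    (hag : ∀ x ∈ S, ∀ y ∈ S, r x y = r' x y) :
    ∀ (xs acc : List α), (∀ x ∈ xs, x ∈ S) → (∀ y ∈ acc, y ∈ S) →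
      xs.foldl (fun a x => PySem.List.insertBy r x a) acc
        = xs.foldl (fun a x => PySem.List.insertBy r' x a) acc := by
  intro xs
  induction xs with
  | nil => intro acc _ _; rfl
  | cons x xs ih =>
    intro acc hxs hacc
    simp only [List.foldl_cons]
    rw [insertBy_congr r r' x acc (fun y hy => hag x (hxs x (by simp)) y (hacc y hy))]
    exact ih _ (fun z hz => hxs z (by simp [hz]))
      (fun y hy => ((PySem.List.mem_insertBy r' x y acc).1 hy).elim
        (fun e => e ▸ hxs x (by simp)) (fun hm => hacc y hm))

lemma sorted_key_congr {α : Type} (xs : List α) (k1 k2 : α → Int)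
    (h : ∀ x ∈ xs, ∀ y ∈ xs, decide (k1 x < k1 y) = decide (k2 x < k2 y)) :
    PySem.List.sorted xs k1 false = PySem.List.sorted xs k2 false := by
  rw [PySem.List.sorted_eq_foldl_insertBy, PySem.List.sorted_eq_foldl_insertBy]
  exact foldl_insertBy_congr xs _ _ h xs [] (fun x hx => hx) (by simp)

-- items of A's fold: fresh keys append in order
lemma items_foldl_insert (f : Int → Int) :
    ∀ (xs : List Int) (d : PySem.Dict Int Int), xs.Nodup →
      (∀ b ∈ xs, d.contains b = false) →
      (xs.foldl (fun d b => d.insert b (f b)) d).items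
        = d.items ++ xs.map (fun b => (b, f b)) := by
  intro xs
  induction xs with
  | nil => intro d _ _; simp
  | cons x xs ih =>
    intro d hnd hfr
    simp only [List.foldl_cons, List.map_cons]
    have hx : d.contains x = false := hfr x (by simp)
    have hins : (d.insert x (f x)).items = d.items ++ [(x, f x)] := by
      simp [PySem.Dict.insert, hx]
    rw [ih (d.insert x (f x)) (List.Nodup.of_cons hnd)
        (fun b hb => by
          rw [PySem.Dict.contains_insert]
          have hbx : b ≠ x := by
            intro e; exact (List.nodup_cons.1 hnd).1 (e ▸ hb)
          simp [hbx, hfr b (by simp [hb])]),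
      hins]
    simp

-- F over a snoc
lemma pvF_append (h : List Int) (x b : Int) :
    pvF (h ++ [x]) b = if x == b then some (h.length : Int) else pvF h b := by
  unfold pvF
  rw [PySem.List.enumerate_append]
  by_cases hxb : (x == b) = true <;>
    simp [PySem.List.enumerate, hxb, List.getLast?_append]

-- B's dict lookup computes the last occurrence index
lemma getB_eq_pvF (h : List Int) :
    ∀ (d : PySem.Dict Int Int) (b : Int), 1 ≤ b → b ≤ 25 →
      ((PySem.List.enumerate h 0).foldl (fun d p =>
          if 1 ≤ p.2 ∧ p.2 ≤ 25 then d.insert p.2 p.1 else d) d).get? b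
        = (pvF h b).or (d.get? b) := by
  induction h using List.reverseRecOn with
  | nil => intro d b _ _; simp [PySem.List.enumerate, pvF]
  | append_singleton h x ih =>
    intro d b hb1 hb2
    rw [PySem.List.enumerate_append]
    simp only [List.foldl_append]
    rw [pvF_append]
    by_cases hx : 1 ≤ x ∧ x ≤ 25
    · by_cases hxb : x = b
      · subst hxb
        simp [PySem.List.enumerate, hx, PySem.Dict.get?_insert_self]
      · have : (x == b) = false := by simp [hxb]
        simp only [PySem.List.enumerate, List.foldl_cons, List.foldl_nil, this,
          if_pos hx, if_false, Bool.false_eq_true]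
        rw [PySem.Dict.get?_insert_of_ne _ _ (Ne.symm hxb)]
        exact ih d b hb1 hb2
    · have hxb : (x == b) = false := by
        simp only [beq_eq_false_iff_ne, ne_eq]
        intro e; exact hx (e ▸ ⟨hb1, hb2⟩)
      simp only [PySem.List.enumerate, List.foldl_cons, List.foldl_nil, if_neg hx, hxb,
        Bool.false_eq_true, if_false]
      exact ih d b hb1 hb2

-- bounds of the last-occurrence index
lemma pvF_bounds (h : List Int) (b i : Int) (hF : pvF h b = some i) :
    0 ≤ i ∧ i < (h.length : Int) := by
  unfold pvF at hF
  have hm := List.mem_of_getLast? hF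
  simp only [List.mem_map, List.mem_filter] at hm
  obtain ⟨p, ⟨hp, _⟩, hpi⟩ := hm
  rw [PySem.List.mem_enumerate_iff] at hp
  obtain ⟨k, hk, rfl⟩ := hp
  simp only at hpi
  omega

lemma pvValA_eq (h : List Int) (b : Int) :
    (if (((PySem.List.enumerate h 0).filter (fun p => p.2 == b)).map (·.1)) ≠ [] then
        (h.length : Int) - 1 - ((PySem.List.pyGet? (((PySem.List.enumerate h 0).filter (fun p => p.2 == b)).map (·.1)) (-1)).getD 0)
      else (h.length : Int))
      = pvValA h b := by
  unfold pvValA pvF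
  rw [PySem.List.pyGet?_neg_one]
  rcases hL : (((PySem.List.enumerate h 0).filter (fun p => p.2 == b)).map (·.1)).getLast? with _ | i
  · simp [List.getLast?_eq_none_iff.1 hL]
  · have : (((PySem.List.enumerate h 0).filter (fun p => p.2 == b)).map (·.1)) ≠ [] := by
      intro e; rw [e] at hL; simp at hL
    simp [this, hL]

-- ===== VERDICT (by name: the statement is the Claim_ definition above) =====
theorem calcular_ranking_atraso_completo_spec : Claim_equal_calcular_ranking_atraso_completo := by
  intro h _
  unfold Spec_calcular_ranking_atraso_completo
  unfold calcular_ranking_atraso_completo calcular_ranking_atraso_completo_alt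
  by_cases hnil : h = []
  · simp [hnil]
  · simp only [if_neg hnil]
    -- A's fold body stores pvValA
    have hbody : (fun (d : PySem.Dict Int Int) (b : Int) =>
        let indices : List Int :=
          ((PySem.List.enumerate h 0).filter (fun p => p.2 == b)).map (·.1)
        let val : Int :=
          if indices ≠ [] then (h.length : Int) - 1 - ((PySem.List.pyGet? indices (-1)).getD 0) else (h.length : Int)
        d.insert b val) = fun d b => d.insert b (pvValA h b) := by
      funext d b
      simp only
      rw [pvValA_eq]
    rw [hbody]
    have hitems : ((PySem.List.pyRange 1 26 1).foldl
        (fun d b => d.insert b (pvValA h b)) PySem.Dict.empty).items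
        = (PySem.List.pyRange 1 26 1).map (fun b => (b, pvValA h b)) := by
      rw [items_foldl_insert (pvValA h) (PySem.List.pyRange 1 26 1) PySem.Dict.empty
        (by decide) (fun b _ => rfl)]
      rfl
    rw [hitems, sorted_map (fun b => (b, pvValA h b)) (fun x => -x.2)]
    rw [List.map_map]
    have hid : ((fun (x : Int × Int) => x.1) ∘ fun b => (b, pvValA h b)) = id := rfl
    rw [hid, List.map_id]
    apply sorted_key_congr
    intro a ha b hb
    have ha' : 1 ≤ a ∧ a ≤ 25 := by
      have := PySem.List.mem_pyRange_one.1 ha; omega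
    have hb' : 1 ≤ b ∧ b ≤ 25 := by
      have := PySem.List.mem_pyRange_one.1 hb; omega
    have hga := getB_eq_pvF h PySem.Dict.empty a ha'.1 ha'.2
    have hgb := getB_eq_pvF h PySem.Dict.empty b hb'.1 hb'.2
    have hempty : (PySem.Dict.empty : PySem.Dict Int Int).get? a = none := rfl
    have hempty' : (PySem.Dict.empty : PySem.Dict Int Int).get? b = none := rfl
    rw [hempty, Option.or_none] at hga
    rw [hempty', Option.or_none] at hgb
    simp only [PySem.Dict.getD, hga, hgb]
    rw [decide_eq_decide]
    rcases hFa : pvF h a with _ | i <;> rcases hFb : pvF h b with _ | j <;>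
      simp only [pvValA, hFa, hFb, Option.getD_some, Option.getD_none]
    · omega
    · have := pvF_bounds h b j hFb; omega
    · have := pvF_bounds h a i hFa; omega
    · have h1 := pvF_bounds h a i hFa
      have h2 := pvF_bounds h b j hFb
      omega
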